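-- pv_equiv track=rewrite | github.com/nsnw/aprspy | aprspy/utils.py | generate_passcode
-- ===== SOURCE A (Python) =====
-- def generate_passcode(callsign: str) -> str:
--     """
--     Generate an APRS-IS passcode for a given callsign.
--
--     :param str callsign: a callsign, with or without an SSID
--
--     This will generate an APRS-IS passcode for a callsign, after stripping the SSID (if given).
--     """
--     # Initialise the passcode with 0x73e2
--     passcode = 0x73e2
--
--     # Strip the SSID off the callsign, and convert it to uppercase
--     base_call = callsign.split("-")[0].upper()
--
--     # The algorithm XORs each character of the callsign with the passcode, alternating between
--     # shifting the ASCII value 8 bits to the left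
--     high = True
--     for c in base_call:
--         if high:
--             passcode ^= (ord(c) << 8)
--             high = False
--         else:
--             passcode ^= ord(c)
--             high = True
--
--     # Return the passcode as a string
--     return str(passcode)
-- ===== SOURCE B (Python) =====
-- def generate_passcode(callsign: str) -> str:
--     """
--     Generate an APRS-IS passcode for a given callsign.
--
--     Staged computation: XOR the characters at even positions and at odd positions
--     of the base callsign separately, then combine both folds with the seed in one
--     closed expression (XOR commutes with the 8-bit shift, so this equals the
--     classic alternating-shift loop).
--     """
--     base_call = callsign.split("-")[0].upper()
--     hi = 0
--     for c in base_call[::2]: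
--         hi ^= ord(c)
--     lo = 0
--     for c in base_call[1::2]:
--         lo ^= ord(c)
--     return str(0x73E2 ^ (hi << 8) ^ lo)
-- ===== Notes on version B (the rewrite author's own statement) =====
-- stated objective: alternative
-- what changed: B replaces A's single loop with a mutating high/low parity flag by two staged passes - one XOR fold over the even-position characters and one over the odd-position characters - combined at the end in a single closed expression 0x73E2 ^ (hi << 8) ^ lo, which is correct because XOR distributes over the left shift.
import Mathlib
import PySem

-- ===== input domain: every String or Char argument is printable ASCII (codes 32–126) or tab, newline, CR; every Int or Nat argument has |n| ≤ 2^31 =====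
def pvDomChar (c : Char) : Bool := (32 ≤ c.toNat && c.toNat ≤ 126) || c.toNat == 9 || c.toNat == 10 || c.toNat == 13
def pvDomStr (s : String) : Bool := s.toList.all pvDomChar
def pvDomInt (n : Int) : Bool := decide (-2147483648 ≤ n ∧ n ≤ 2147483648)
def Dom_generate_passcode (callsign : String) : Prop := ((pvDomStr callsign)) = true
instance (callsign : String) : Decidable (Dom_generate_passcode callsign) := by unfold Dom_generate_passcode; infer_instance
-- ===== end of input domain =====

-- B computes the passcode in two staged passes — an XOR fold over the even-position and one over
-- the odd-position characters of the base callsign — combined at the end in one closed expression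
-- 0x73E2 ^ (hi << 8) ^ lo, instead of A's single loop with a mutating high/low parity flag.
-- Alternative decomposition, same cost.


-- ===== PORT A =====
-- callsign.split("-")[0].upper(): PySem.Chars.splitOn never returns [], so Python's [0] is the head.
def generate_passcode (callsign : String) : String :=
  let passcode : Int := 0x73e2
  let base_call : List Char := PySem.Chars.upper ((PySem.Chars.splitOn callsign.toList ['-']).headI)
  -- for c in base_call with the alternating `high` flag, carried as foldl state (passcode, high)
  let st := base_call.foldl
    (fun (st : Int × Bool) c =>
      if st.2 then (PySem.Int.bxor st.1 ((c.toNat : Int) <<< (8:Nat)), false)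
      else (PySem.Int.bxor st.1 (c.toNat : Int), true))
    (passcode, true)
  PySem.Int.toStr st.1

-- ===== PORT B =====
-- hand port of the extended slice xs[::2] (start 0, step 2): every second element; exact for step 2.
def pvStep2 {α : Type} : List α → List α
  | [] => []
  | [c] => [c]
  | c :: _ :: r => c :: pvStep2 r

def generate_passcode_alt (callsign : String) : String :=
  let base_call : List Char := PySem.Chars.upper ((PySem.Chars.splitOn callsign.toList ['-']).headI)
  -- hi: XOR fold over base_call[::2]
  let hi := (pvStep2 base_call).foldl (fun acc c => PySem.Int.bxor acc (c.toNat : Int)) 0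
  -- lo: XOR fold over base_call[1::2]  (= every second element of base_call.drop 1; exact)
  let lo := (pvStep2 (base_call.drop 1)).foldl (fun acc c => PySem.Int.bxor acc (c.toNat : Int)) 0
  PySem.Int.toStr (PySem.Int.bxor (PySem.Int.bxor (0x73e2 : Int) (hi <<< (8:Nat))) lo)

-- ===== PRECONDITION & SPEC =====
def Spec_generate_passcode (callsign : String) (out : String) : Prop := out = generate_passcode_alt callsign
instance (callsign : String) (out : String) : Decidable (Spec_generate_passcode callsign out) := by unfold Spec_generate_passcode; infer_instance

-- ===== CLAIM (what is proved, stated in full; the proofs are below) =====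
def Claim_equal_generate_passcode : Prop := ∀ (callsign : String), Dom_generate_passcode callsign → Spec_generate_passcode callsign (generate_passcode callsign)

-- ===== LEMMAS AND PROOFS =====

-- Nat-level mirror of the XOR folds (all intermediate values are nonnegative)
def pvNatXor (l : List Char) : Nat := l.foldl (fun a c => a ^^^ c.toNat) 0

def pvNatFoldA (l : List Char) (st : Nat × Bool) : Nat × Bool :=
  l.foldl
    (fun (st : Nat × Bool) c =>
      if st.2 then (st.1 ^^^ (c.toNat <<< 8), false)
      else (st.1 ^^^ c.toNat, true))
    st

theorem pvStep2_cons {α : Type} (c : α) (r : List α) :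
    pvStep2 (c :: r) = c :: pvStep2 (r.drop 1) := by
  cases r <;> rfl

-- pull a foldl-XOR initial value out front
theorem pv_foldl_xor_init (t : List Char) (a : Nat) :
    t.foldl (fun x c => x ^^^ c.toNat) a = a ^^^ pvNatXor t := by
  induction t generalizing a with
  | nil => simp [pvNatXor]
  | cons c r ih =>
      simp only [pvNatXor, List.foldl_cons, Nat.zero_xor] at *
      rw [ih (a ^^^ c.toNat), ih c.toNat, Nat.xor_assoc]

theorem pvNatXor_cons (c : Char) (t : List Char) :
    pvNatXor (c :: t) = c.toNat ^^^ pvNatXor t := by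
  simp only [pvNatXor, List.foldl_cons, Nat.zero_xor]
  exact pv_foldl_xor_init t c.toNat

-- left shift distributes over XOR on Nat
theorem pv_shift_xor (a b : Nat) : (a ^^^ b) <<< 8 = (a <<< 8) ^^^ (b <<< 8) := by
  apply Nat.eq_of_testBit_eq
  intro i
  simp only [Nat.testBit_shiftLeft, Nat.testBit_xor]
  by_cases h : 8 ≤ i <;> simp [h]

-- four-term XOR rearrangement used in both branches of the main lemma
theorem pv_ac (p a x t : Nat) : p ^^^ a ^^^ x ^^^ t = p ^^^ (a ^^^ t) ^^^ x := by
  rw [Nat.xor_assoc (p ^^^ a), Nat.xor_comm x t, ← Nat.xor_assoc (p ^^^ a), Nat.xor_assoc p a t]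

-- A's flag-toggling loop equals the two staged even/odd XOR folds, for both start flags
theorem pv_main (l : List Char) (pc : Nat) :
    (pvNatFoldA l (pc, true)).1 = pc ^^^ (pvNatXor (pvStep2 l) <<< 8) ^^^ pvNatXor (pvStep2 (l.drop 1)) ∧
    (pvNatFoldA l (pc, false)).1 = pc ^^^ pvNatXor (pvStep2 l) ^^^ (pvNatXor (pvStep2 (l.drop 1)) <<< 8) := by
  induction l generalizing pc with
  | nil => simp [pvNatFoldA, pvStep2, pvNatXor]
  | cons c r ih =>
      constructor
      · have h := (ih (pc ^^^ (c.toNat <<< 8))).2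
        simp only [pvNatFoldA, List.foldl_cons, reduceIte] at *
        rw [h, pvStep2_cons, pvNatXor_cons]
        simp only [List.drop_one, List.tail_cons]
        rw [pv_shift_xor]
        exact pv_ac pc (c.toNat <<< 8) (pvNatXor (pvStep2 r)) (pvNatXor (pvStep2 r.tail) <<< 8)
      · have h := (ih (pc ^^^ c.toNat)).1
        simp only [pvNatFoldA, List.foldl_cons, Bool.false_eq_true, reduceIte] at *
        rw [h, pvStep2_cons, pvNatXor_cons]
        simp only [List.drop_one, List.tail_cons]
        exact pv_ac pc c.toNat (pvNatXor (pvStep2 r) <<< 8) (pvNatXor (pvStep2 r.tail))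

-- bridge: A's Int fold is the cast of its Nat mirror
theorem pv_bridgeA (l : List Char) (pc : Nat) (b : Bool) :
    (l.foldl
      (fun (st : Int × Bool) c =>
        if st.2 then (PySem.Int.bxor st.1 ((c.toNat : Int) <<< (8:Nat)), false)
        else (PySem.Int.bxor st.1 (c.toNat : Int), true))
      ((pc : Int), b)).1 = ((pvNatFoldA l (pc, b)).1 : Int) := by
  induction l generalizing pc b with
  | nil => rfl
  | cons c r ih =>
      cases b with
      | true =>
          simp only [pvNatFoldA, List.foldl_cons, reduceIte] at *
          have hsh : ((c.toNat : Int)) <<< (8:Nat) = ((c.toNat <<< 8 : Nat) : Int) := rfl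
          rw [hsh, PySem.Int.bxor_natCast]
          exact ih _ _
      | false =>
          simp only [pvNatFoldA, List.foldl_cons, Bool.false_eq_true, reduceIte] at *
          rw [PySem.Int.bxor_natCast]
          exact ih _ _

-- bridge: B's Int XOR fold is the cast of pvNatXor
theorem pv_bridgeB (l : List Char) (a : Nat) :
    (l.foldl (fun acc c => PySem.Int.bxor acc (c.toNat : Int)) ((a : Int))) =
      ((l.foldl (fun x c => x ^^^ c.toNat) a : Nat) : Int) := by
  induction l generalizing a with
  | nil => rfl
  | cons c r ih =>
      simp only [List.foldl_cons]
      rw [PySem.Int.bxor_natCast]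
      exact ih _

-- ===== VERDICT (by name: the statement is the Claim_ definition above) =====
theorem generate_passcode_spec : Claim_equal_generate_passcode := by
  intro callsign _
  unfold Spec_generate_passcode generate_passcode generate_passcode_alt
  simp only
  set base := PySem.Chars.upper ((PySem.Chars.splitOn callsign.toList ['-']).headI) with hbase
  have hA := pv_bridgeA base 0x73e2 true
  have hhi := pv_bridgeB (pvStep2 base) 0
  have hlo := pv_bridgeB (pvStep2 (base.drop 1)) 0
  have h0 : ((0:Nat) : Int) = (0 : Int) := rfl
  rw [h0] at hhi hlo
  have hc : ((0x73e2 : Nat) : Int) = (0x73e2 : Int) := rfl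
  rw [hc] at hA
  rw [hA, hhi, hlo]
  have hsh : ∀ n : Nat, ((n : Int)) <<< (8:Nat) = ((n <<< 8 : Nat) : Int) := fun _ => rfl
  rw [hsh, show (0x73e2 : Int) = ((0x73e2 : Nat) : Int) from rfl,
    PySem.Int.bxor_natCast, PySem.Int.bxor_natCast]
  have hm := (pv_main base 0x73e2).1
  simp only [pvNatXor] at hm
  rw [hm]
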